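-- pv_equiv track=rewrite | github.com/isa-nurbek/leet-code-challenges | Binary Search Trees/03-Hard/01-Same BSTs/solution_2.py | _same_bsts_helper
-- ===== SOURCE A (Python) =====
-- def _same_bsts_helper(
--     array_one, array_two, root_idx_one, root_idx_two, min_val, max_val
-- ):
--     """
--     Recursive helper function to determine if two arrays represent the same BST.
--
--     Parameters:
--     - array_one, array_two: The input arrays representing BST insertions
--     - root_idx_one, root_idx_two: Current root indices being compared
--     - min_val, max_val: The valid range for child nodes of current root
--     """
--
--     # If both roots are -1 (no children), return True (base case)
--     if root_idx_one == -1 and root_idx_two == -1: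
--         return True
--
--     # If one root exists but the other doesn't, trees are different
--     if (root_idx_one == -1) != (root_idx_two == -1):
--         return False
--
--     # If root values don't match, trees are different
--     if array_one[root_idx_one] != array_two[root_idx_two]:
--         return False
--
--     # Find the index of first element in array_one that would be in left subtree
--     left_root_one = _find_next_smaller(array_one, root_idx_one, min_val)
--     # Find the index of first element in array_two that would be in left subtree
--     left_root_two = _find_next_smaller(array_two, root_idx_two, min_val)
--
--     # Find the index of first element in array_one that would be in right subtree
--     right_root_one = _find_next_larger_or_equal(array_one, root_idx_one, max_val)
--     # Find the index of first element in array_two that would be in right subtree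
--     right_root_two = _find_next_larger_or_equal(array_two, root_idx_two, max_val)
--
--     # Recursively check both left and right subtrees:
--     # For left subtrees: update max_val to current root's value (left must be smaller)
--     # For right subtrees: update min_val to current root's value (right must be larger/equal)
--     return _same_bsts_helper(
--         array_one,
--         array_two,
--         left_root_one,
--         left_root_two,
--         min_val,
--         array_one[root_idx_one],
--     ) and _same_bsts_helper(
--         array_one,
--         array_two,
--         right_root_one,
--         right_root_two,
--         array_one[root_idx_one],
--         max_val,
--     )
--
-- def _find_next_smaller(array, start_idx, min_val):
--     """
--     Finds the index of the first element after start_idx that is: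
--     - Smaller than array[start_idx] (would be in left subtree)
--     - Greater than or equal to min_val (within valid range)
--     Returns -1 if no such element found
--     """
--     for i in range(start_idx + 1, len(array)):
--         if array[i] < array[start_idx] and array[i] >= min_val:
--             return i
--     return -1
--
-- def _find_next_larger_or_equal(array, start_idx, max_val):
--     """
--     Finds the index of the first element after start_idx that is:
--     - Greater than or equal to array[start_idx] (would be in right subtree)
--     - Less than or equal to max_val (within valid range)
--     Returns -1 if no such element found
--     """
--     for i in range(start_idx + 1, len(array)):
--         if array[i] >= array[start_idx] and array[i] <= max_val:
--             return i
--     return -1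
-- ===== SOURCE B (Python) =====
-- def _same_bsts_helper(
--     array_one, array_two, root_idx_one, root_idx_two, min_val, max_val
-- ):
--     # Build each array's BST explicitly (as nested tuples) and compare the
--     # two structures, instead of recursing over both arrays simultaneously.
--     if root_idx_one == -1 or root_idx_two == -1:
--         # a missing root can only match a missing root
--         return root_idx_one == root_idx_two
--     return _build_tree(array_one, root_idx_one, min_val, max_val) == _build_tree(
--         array_two, root_idx_two, min_val, max_val
--     )
--
--
-- def _build_tree(array, idx, min_val, max_val):
--     """Materialise the subtree rooted at array[idx] whose values must lie in
--     the window, as (root, left_subtree, right_subtree); None = no subtree."""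
--     if idx == -1:
--         return None
--     root = array[idx]
--     left_idx = next(
--         (j for j in range(idx + 1, len(array)) if min_val <= array[j] < root), -1
--     )
--     right_idx = next(
--         (j for j in range(idx + 1, len(array)) if root <= array[j] <= max_val), -1
--     )
--     return (
--         root,
--         _build_tree(array, left_idx, min_val, root),
--         _build_tree(array, right_idx, root, max_val),
--     )
-- ===== Notes on version B (the rewrite author's own statement) =====
-- stated objective: alternative
-- what changed: A decides equality by a simultaneous recursion over both arrays with two index-scan helpers per node; B instead materialises each array's BST once as an explicit nested tuple (root, left, right) and compares the two structures, so the pairwise recursion and its mixed base cases disappear.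
import Mathlib
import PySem

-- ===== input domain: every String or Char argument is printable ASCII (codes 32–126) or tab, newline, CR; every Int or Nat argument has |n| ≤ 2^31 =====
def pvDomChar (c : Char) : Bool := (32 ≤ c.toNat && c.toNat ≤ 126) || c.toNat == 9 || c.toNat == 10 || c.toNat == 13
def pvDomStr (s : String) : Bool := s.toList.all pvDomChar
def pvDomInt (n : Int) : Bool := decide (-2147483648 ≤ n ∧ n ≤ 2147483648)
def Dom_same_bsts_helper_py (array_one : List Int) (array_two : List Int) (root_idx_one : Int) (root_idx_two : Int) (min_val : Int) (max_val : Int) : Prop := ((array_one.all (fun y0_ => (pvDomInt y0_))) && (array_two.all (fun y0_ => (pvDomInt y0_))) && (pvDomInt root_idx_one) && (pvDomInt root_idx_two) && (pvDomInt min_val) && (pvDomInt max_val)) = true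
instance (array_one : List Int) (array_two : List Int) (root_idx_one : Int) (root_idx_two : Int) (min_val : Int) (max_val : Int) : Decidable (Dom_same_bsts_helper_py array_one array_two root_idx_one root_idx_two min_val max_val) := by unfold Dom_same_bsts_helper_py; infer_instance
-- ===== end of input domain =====

-- B replaces A's simultaneous two-array recursion by materialising each array's BST
-- as an explicit tree and comparing the two trees (objective: alternative decomposition).

-- termination measure shared by both ports: distance from the current index to the
-- end of the array (-1, "no subtree", is the smallest)
def pvMu (len : Nat) (i : Int) : Nat := if i = -1 then 0 else ((len : Int) - i).toNat

-- any index produced by a first-match scan over range(start+1, len(array)) lies in [start+1, len)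
theorem pvFind_range {a b : Int} {p : Int → Bool} {c : Int}
    (h : (PySem.List.pyRange a b 1).find? p = some c) : a ≤ c ∧ c < b :=
  PySem.List.mem_pyRange_one.1 (List.mem_of_find?_eq_some h)

theorem pvMu_lt {len : Nat} {i c : Int} (_hlo : -(len : Int) ≤ i) (hhi : i < (len : Int))
    (hne : i ≠ -1) (hc : c = -1 ∨ (i + 1 ≤ c ∧ c < (len : Int))) : pvMu len c < pvMu len i := by
  unfold pvMu; split_ifs <;> omega

-- ===== PORT A =====
-- port of _find_next_smaller: first i in range(start_idx+1, len(array)) with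
-- array[i] < array[start_idx] and array[i] >= min_val, else -1
def pvFindNextSmaller (array : List Int) (start_idx : Int) (min_val : Int) : Int :=
  match (PySem.List.pyRange (start_idx + 1) array.length 1).find?
      (fun i => decide (PySem.List.pyGetD array i 0 < PySem.List.pyGetD array start_idx 0)
             && decide (min_val ≤ PySem.List.pyGetD array i 0)) with
  | some i => i
  | none => -1

-- port of _find_next_larger_or_equal: first i in range(start_idx+1, len(array)) with
-- array[i] >= array[start_idx] and array[i] <= max_val, else -1
def pvFindNextLargerOrEqual (array : List Int) (start_idx : Int) (max_val : Int) : Int :=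
  match (PySem.List.pyRange (start_idx + 1) array.length 1).find?
      (fun i => decide (PySem.List.pyGetD array start_idx 0 ≤ PySem.List.pyGetD array i 0)
             && decide (PySem.List.pyGetD array i 0 ≤ max_val)) with
  | some i => i
  | none => -1

theorem pvFindNextSmaller_range (array : List Int) (start_idx min_val : Int) :
    pvFindNextSmaller array start_idx min_val = -1 ∨
      (start_idx + 1 ≤ pvFindNextSmaller array start_idx min_val ∧
        pvFindNextSmaller array start_idx min_val < (array.length : Int)) := by
  unfold pvFindNextSmaller
  split
  · next _ h => exact Or.inr (pvFind_range h)
  · exact Or.inl rfl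

theorem pvFindNextLargerOrEqual_range (array : List Int) (start_idx max_val : Int) :
    pvFindNextLargerOrEqual array start_idx max_val = -1 ∨
      (start_idx + 1 ≤ pvFindNextLargerOrEqual array start_idx max_val ∧
        pvFindNextLargerOrEqual array start_idx max_val < (array.length : Int)) := by
  unfold pvFindNextLargerOrEqual
  split
  · next _ h => exact Or.inr (pvFind_range h)
  · exact Or.inl rfl

def same_bsts_helper_py (array_one : List Int) (array_two : List Int) (root_idx_one : Int) (root_idx_two : Int) (min_val : Int) (max_val : Int) : Bool :=
  if hBoth : root_idx_one = -1 ∧ root_idx_two = -1 then true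
  else if hXor : decide (root_idx_one = -1) ≠ decide (root_idx_two = -1) then false
  else
    match h1 : PySem.List.pyGet? array_one root_idx_one, h2 : PySem.List.pyGet? array_two root_idx_two with
    | some r1, some r2 =>
      if r1 ≠ r2 then false
      else
        same_bsts_helper_py array_one array_two
          (pvFindNextSmaller array_one root_idx_one min_val)
          (pvFindNextSmaller array_two root_idx_two min_val)
          min_val r1
        && same_bsts_helper_py array_one array_two
          (pvFindNextLargerOrEqual array_one root_idx_one max_val)
          (pvFindNextLargerOrEqual array_two root_idx_two max_val)
          r1 max_val
    | _, _ => false   -- Python raises IndexError here (a root index out of range): excluded by Pre_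
termination_by pvMu array_one.length root_idx_one + pvMu array_two.length root_idx_two
decreasing_by
  all_goals
    have hiff : (root_idx_one = -1) ↔ (root_idx_two = -1) := decide_eq_decide.1 (not_not.1 hXor)
    have hne1 : root_idx_one ≠ -1 := fun e1 => hBoth ⟨e1, hiff.1 e1⟩
    have hne2 : root_idx_two ≠ -1 := fun e2 => hBoth ⟨hiff.2 e2, e2⟩
    have hr1 : PySem.Raise.InRange array_one.length root_idx_one := by
      by_contra hn
      rw [← PySem.List.pyGet?_eq_none_iff] at hn
      simp [hn] at h1
    have hr2 : PySem.Raise.InRange array_two.length root_idx_two := by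
      by_contra hn
      rw [← PySem.List.pyGet?_eq_none_iff] at hn
      simp [hn] at h2
    exact Nat.add_lt_add
      (pvMu_lt hr1.1 hr1.2 hne1 (by first
        | exact pvFindNextSmaller_range array_one root_idx_one min_val
        | exact pvFindNextLargerOrEqual_range array_one root_idx_one max_val))
      (pvMu_lt hr2.1 hr2.2 hne2 (by first
        | exact pvFindNextSmaller_range array_two root_idx_two min_val
        | exact pvFindNextLargerOrEqual_range array_two root_idx_two max_val))

-- ===== PORT B =====
inductive PvTree where
  | nil : PvTree
  | node (value : Int) (left : PvTree) (right : PvTree) : PvTree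
deriving DecidableEq

-- port of B's `next((j for j in range(idx+1, len(array)) if min_val <= array[j] < root), -1)`
def pvLeftChildIdx (array : List Int) (idx min_val root : Int) : Int :=
  match (PySem.List.pyRange (idx + 1) array.length 1).find?
      (fun j => decide (min_val ≤ PySem.List.pyGetD array j 0)
             && decide (PySem.List.pyGetD array j 0 < root)) with
  | some j => j
  | none => -1

-- port of B's `next((j for j in range(idx+1, len(array)) if root <= array[j] <= max_val), -1)`
def pvRightChildIdx (array : List Int) (idx max_val root : Int) : Int :=
  match (PySem.List.pyRange (idx + 1) array.length 1).find?
      (fun j => decide (root ≤ PySem.List.pyGetD array j 0)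
             && decide (PySem.List.pyGetD array j 0 ≤ max_val)) with
  | some j => j
  | none => -1

theorem pvLeftChildIdx_range (array : List Int) (idx min_val root : Int) :
    pvLeftChildIdx array idx min_val root = -1 ∨
      (idx + 1 ≤ pvLeftChildIdx array idx min_val root ∧
        pvLeftChildIdx array idx min_val root < (array.length : Int)) := by
  unfold pvLeftChildIdx
  split
  · next _ h => exact Or.inr (pvFind_range h)
  · exact Or.inl rfl

theorem pvRightChildIdx_range (array : List Int) (idx max_val root : Int) :
    pvRightChildIdx array idx max_val root = -1 ∨
      (idx + 1 ≤ pvRightChildIdx array idx max_val root ∧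
        pvRightChildIdx array idx max_val root < (array.length : Int)) := by
  unfold pvRightChildIdx
  split
  · next _ h => exact Or.inr (pvFind_range h)
  · exact Or.inl rfl

-- port of _build_tree
def pvBuildTree (array : List Int) (idx : Int) (min_val : Int) (max_val : Int) : PvTree :=
  if idx = -1 then PvTree.nil
  else
    match hr : PySem.List.pyGet? array idx with
    | none => PvTree.nil   -- Python raises IndexError here: excluded by Pre_
    | some root =>
      PvTree.node root
        (pvBuildTree array (pvLeftChildIdx array idx min_val root) min_val root)
        (pvBuildTree array (pvRightChildIdx array idx max_val root) root max_val)
termination_by pvMu array.length idx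
decreasing_by
  all_goals
    rename_i hne
    have hin : PySem.Raise.InRange array.length idx := by
      by_contra hn
      rw [← PySem.List.pyGet?_eq_none_iff] at hn
      simp [hn] at hr
    first
    | exact pvMu_lt hin.1 hin.2 hne (pvLeftChildIdx_range array idx min_val root)
    | exact pvMu_lt hin.1 hin.2 hne (pvRightChildIdx_range array idx max_val root)

def same_bsts_helper_py_alt (array_one : List Int) (array_two : List Int) (root_idx_one : Int) (root_idx_two : Int) (min_val : Int) (max_val : Int) : Bool :=
  if root_idx_one = -1 ∨ root_idx_two = -1 then decide (root_idx_one = root_idx_two)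
  else decide (pvBuildTree array_one root_idx_one min_val max_val
             = pvBuildTree array_two root_idx_two min_val max_val)

-- ===== PRECONDITION & SPEC =====
-- Pre_ excludes exactly the inputs on which Python A raises IndexError: both root
-- indices name a node (≠ -1) and either initial index is outside Python's index range.
def Pre_same_bsts_helper_py (array_one : List Int) (array_two : List Int) (root_idx_one : Int) (root_idx_two : Int) (min_val : Int) (max_val : Int) : Prop :=
  (root_idx_one ≠ -1 ∧ root_idx_two ≠ -1) →
    (PySem.Raise.InRange array_one.length root_idx_one ∧ PySem.Raise.InRange array_two.length root_idx_two)
instance (array_one : List Int) (array_two : List Int) (root_idx_one : Int) (root_idx_two : Int) (min_val : Int) (max_val : Int) : Decidable (Pre_same_bsts_helper_py array_one array_two root_idx_one root_idx_two min_val max_val) := by unfold Pre_same_bsts_helper_py; infer_instance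

def pvWitness_same_bsts_helper_py : List Int × List Int × Int × Int × Int × Int :=
  ([10, 8, 12, 9], [10, 12, 8, 9], 0, 0, -100, 100)

def Spec_same_bsts_helper_py (array_one : List Int) (array_two : List Int) (root_idx_one : Int) (root_idx_two : Int) (min_val : Int) (max_val : Int) (out : Bool) : Prop := out = same_bsts_helper_py_alt array_one array_two root_idx_one root_idx_two min_val max_val
instance (array_one : List Int) (array_two : List Int) (root_idx_one : Int) (root_idx_two : Int) (min_val : Int) (max_val : Int) (out : Bool) : Decidable (Spec_same_bsts_helper_py array_one array_two root_idx_one root_idx_two min_val max_val out) := by unfold Spec_same_bsts_helper_py; infer_instance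

-- ===== CLAIM (what is proved, stated in full; the proofs are below) =====
def Claim_equal_same_bsts_helper_py : Prop := ∀ (array_one : List Int) (array_two : List Int) (root_idx_one : Int) (root_idx_two : Int) (min_val : Int) (max_val : Int), Dom_same_bsts_helper_py array_one array_two root_idx_one root_idx_two min_val max_val → Pre_same_bsts_helper_py array_one array_two root_idx_one root_idx_two min_val max_val → Spec_same_bsts_helper_py array_one array_two root_idx_one root_idx_two min_val max_val (same_bsts_helper_py array_one array_two root_idx_one root_idx_two min_val max_val)

-- ===== LEMMAS AND PROOFS =====

theorem pv_some_of_inrange {a : List Int} {i : Int}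
    (h : PySem.Raise.InRange a.length i) : ∃ r, PySem.List.pyGet? a i = some r := by
  rcases ho : PySem.List.pyGet? a i with _ | r
  · exact absurd ((PySem.List.pyGet?_eq_none_iff a i).1 ho) (not_not_intro h)
  · exact ⟨r, rfl⟩

theorem pv_mu_pos {len : Nat} {i : Int} (hne : i ≠ -1)
    (h : PySem.Raise.InRange len i) : 1 ≤ pvMu len i := by
  unfold pvMu
  rcases h with ⟨h1, h2⟩
  split_ifs <;> omega

-- one-step characterisations of the two ports
theorem pvA_base (a1 a2 : List Int) (lo hi : Int) :
    same_bsts_helper_py a1 a2 (-1) (-1) lo hi = true := by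
  rw [same_bsts_helper_py]
  simp

theorem pvA_mixed {i1 i2 : Int} (a1 a2 : List Int) (lo hi : Int)
    (hne : ¬(i1 = -1 ↔ i2 = -1)) :
    same_bsts_helper_py a1 a2 i1 i2 lo hi = false := by
  rw [same_bsts_helper_py]
  rw [dif_neg (by tauto), dif_pos (by simpa [ne_eq, decide_eq_decide] using hne)]

theorem pvA_step {a1 a2 : List Int} {i1 i2 r1 r2 : Int} (lo hi : Int)
    (e1 : i1 ≠ -1) (e2 : i2 ≠ -1)
    (h1 : PySem.List.pyGet? a1 i1 = some r1) (h2 : PySem.List.pyGet? a2 i2 = some r2) :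
    same_bsts_helper_py a1 a2 i1 i2 lo hi =
      if r1 ≠ r2 then false
      else
        same_bsts_helper_py a1 a2 (pvFindNextSmaller a1 i1 lo) (pvFindNextSmaller a2 i2 lo) lo r1
        && same_bsts_helper_py a1 a2 (pvFindNextLargerOrEqual a1 i1 hi) (pvFindNextLargerOrEqual a2 i2 hi) r1 hi := by
  rw [same_bsts_helper_py]
  rw [dif_neg (by tauto), dif_neg (by simp [e1, e2])]
  split
  · next ra rb heqa heqb =>
    rw [h1] at heqa; rw [h2] at heqb
    cases heqa; cases heqb
    rfl
  · next hbad =>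
    exact (hbad r1 r2 h1 h2).elim

theorem pvBuildTree_neg_one (a : List Int) (lo hi : Int) :
    pvBuildTree a (-1) lo hi = PvTree.nil := by
  rw [pvBuildTree]
  simp

theorem pvBuildTree_node {a : List Int} {idx r : Int} (lo hi : Int)
    (hne : idx ≠ -1) (h : PySem.List.pyGet? a idx = some r) :
    pvBuildTree a idx lo hi =
      PvTree.node r (pvBuildTree a (pvLeftChildIdx a idx lo r) lo r)
        (pvBuildTree a (pvRightChildIdx a idx hi r) r hi) := by
  rw [pvBuildTree]
  rw [if_neg hne]
  split
  · next heq => rw [h] at heq; cases heq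
  · next r' heq =>
    rw [h] at heq
    cases heq
    rfl

-- A's scan and B's scan look for the same first candidate once the root value is fixed
theorem pv_scan_eq_left (a : List Int) (i lo r : Int) (h : PySem.List.pyGet? a i = some r) :
    pvFindNextSmaller a i lo = pvLeftChildIdx a i lo r := by
  have hd : PySem.List.pyGetD a i 0 = r := by simp [PySem.List.pyGetD, h]
  unfold pvFindNextSmaller pvLeftChildIdx
  have hp : (fun j => decide (PySem.List.pyGetD a j 0 < PySem.List.pyGetD a i 0)
             && decide (lo ≤ PySem.List.pyGetD a j 0))
          = (fun j => decide (lo ≤ PySem.List.pyGetD a j 0)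
             && decide (PySem.List.pyGetD a j 0 < r)) := by
    funext j; rw [hd, Bool.and_comm]
  rw [hp]

theorem pv_scan_eq_right (a : List Int) (i hi r : Int) (h : PySem.List.pyGet? a i = some r) :
    pvFindNextLargerOrEqual a i hi = pvRightChildIdx a i hi r := by
  have hd : PySem.List.pyGetD a i 0 = r := by simp [PySem.List.pyGetD, h]
  unfold pvFindNextLargerOrEqual pvRightChildIdx
  have hp : (fun j => decide (PySem.List.pyGetD a i 0 ≤ PySem.List.pyGetD a j 0)
             && decide (PySem.List.pyGetD a j 0 ≤ hi))
          = (fun j => decide (r ≤ PySem.List.pyGetD a j 0)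
             && decide (PySem.List.pyGetD a j 0 ≤ hi)) := by
    funext j; rw [hd]
  rw [hp]

-- the heart of the file: A's simultaneous recursion answers exactly "the two materialised trees are equal"
theorem pv_main : ∀ (n : Nat) (a1 a2 : List Int) (i1 i2 lo hi : Int),
    pvMu a1.length i1 + pvMu a2.length i2 ≤ n →
    (i1 = -1 ∨ PySem.Raise.InRange a1.length i1) →
    (i2 = -1 ∨ PySem.Raise.InRange a2.length i2) →
    same_bsts_helper_py a1 a2 i1 i2 lo hi =
      decide (pvBuildTree a1 i1 lo hi = pvBuildTree a2 i2 lo hi) := by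
  intro n
  induction n with
  | zero =>
    intro a1 a2 i1 i2 lo hi hn hv1 hv2
    have e1 : i1 = -1 := by
      rcases hv1 with e | h
      · exact e
      · by_contra hne; have := pv_mu_pos hne h; omega
    have e2 : i2 = -1 := by
      rcases hv2 with e | h
      · exact e
      · by_contra hne; have := pv_mu_pos hne h; omega
    subst e1; subst e2
    rw [pvA_base, pvBuildTree_neg_one, pvBuildTree_neg_one]
    simp
  | succ n ih =>
    intro a1 a2 i1 i2 lo hi hn hv1 hv2
    by_cases e1 : i1 = -1
    · by_cases e2 : i2 = -1
      · subst e1; subst e2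
        rw [pvA_base, pvBuildTree_neg_one, pvBuildTree_neg_one]
        simp
      · subst e1
        rcases hv2 with e | h2
        · exact absurd e e2
        rcases pv_some_of_inrange h2 with ⟨r2, hr2⟩
        rw [pvA_mixed a1 a2 lo hi (by simp [e2]), pvBuildTree_neg_one,
          pvBuildTree_node lo hi e2 hr2]
        simp
    · by_cases e2 : i2 = -1
      · subst e2
        rcases hv1 with e | h1
        · exact absurd e e1
        rcases pv_some_of_inrange h1 with ⟨r1, hr1⟩
        rw [pvA_mixed a1 a2 lo hi (by simp [e1]), pvBuildTree_neg_one,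
          pvBuildTree_node lo hi e1 hr1]
        simp
      · rcases hv1 with e | h1
        · exact absurd e e1
        rcases hv2 with e | h2
        · exact absurd e e2
        rcases pv_some_of_inrange h1 with ⟨r1, hr1⟩
        rcases pv_some_of_inrange h2 with ⟨r2, hr2⟩
        rw [pvA_step lo hi e1 e2 hr1 hr2, pvBuildTree_node lo hi e1 hr1,
          pvBuildTree_node lo hi e2 hr2]
        by_cases hr : r1 = r2
        · subst hr
          rw [if_neg (not_not_intro rfl)]
          rw [pv_scan_eq_left a1 i1 lo r1 hr1, pv_scan_eq_left a2 i2 lo r1 hr2,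
            pv_scan_eq_right a1 i1 hi r1 hr1, pv_scan_eq_right a2 i2 hi r1 hr2]
          have hmu1 := pv_mu_pos e1 h1
          have hmu2 := pv_mu_pos e2 h2
          have decL1 := pvMu_lt h1.1 h1.2 e1 (pvLeftChildIdx_range a1 i1 lo r1)
          have decL2 := pvMu_lt h2.1 h2.2 e2 (pvLeftChildIdx_range a2 i2 lo r1)
          have decR1 := pvMu_lt h1.1 h1.2 e1 (pvRightChildIdx_range a1 i1 hi r1)
          have decR2 := pvMu_lt h2.1 h2.2 e2 (pvRightChildIdx_range a2 i2 hi r1)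
          have valL1 : pvLeftChildIdx a1 i1 lo r1 = -1 ∨
              PySem.Raise.InRange a1.length (pvLeftChildIdx a1 i1 lo r1) := by
            rcases pvLeftChildIdx_range a1 i1 lo r1 with e | ⟨hl, hr'⟩
            · exact Or.inl e
            · exact Or.inr ⟨by have := h1.1; omega, hr'⟩
          have valL2 : pvLeftChildIdx a2 i2 lo r1 = -1 ∨
              PySem.Raise.InRange a2.length (pvLeftChildIdx a2 i2 lo r1) := by
            rcases pvLeftChildIdx_range a2 i2 lo r1 with e | ⟨hl, hr'⟩
            · exact Or.inl e
            · exact Or.inr ⟨by have := h2.1; omega, hr'⟩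
          have valR1 : pvRightChildIdx a1 i1 hi r1 = -1 ∨
              PySem.Raise.InRange a1.length (pvRightChildIdx a1 i1 hi r1) := by
            rcases pvRightChildIdx_range a1 i1 hi r1 with e | ⟨hl, hr'⟩
            · exact Or.inl e
            · exact Or.inr ⟨by have := h1.1; omega, hr'⟩
          have valR2 : pvRightChildIdx a2 i2 hi r1 = -1 ∨
              PySem.Raise.InRange a2.length (pvRightChildIdx a2 i2 hi r1) := by
            rcases pvRightChildIdx_range a2 i2 hi r1 with e | ⟨hl, hr'⟩
            · exact Or.inl e
            · exact Or.inr ⟨by have := h2.1; omega, hr'⟩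
          have ihL := ih a1 a2 (pvLeftChildIdx a1 i1 lo r1) (pvLeftChildIdx a2 i2 lo r1)
            lo r1 (by omega) valL1 valL2
          have ihR := ih a1 a2 (pvRightChildIdx a1 i1 hi r1) (pvRightChildIdx a2 i2 hi r1)
            r1 hi (by omega) valR1 valR2
          rw [ihL, ihR]
          simp [PvTree.node.injEq]
        · rw [if_pos hr]
          simp [PvTree.node.injEq, hr]

-- ===== VERDICT (by name: the statement is the Claim_ definition above) =====
theorem same_bsts_helper_py_spec : Claim_equal_same_bsts_helper_py := by
  unfold Claim_equal_same_bsts_helper_py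
  intro a1 a2 i1 i2 lo hi _ hpre
  unfold Spec_same_bsts_helper_py same_bsts_helper_py_alt
  by_cases e1 : i1 = -1
  · by_cases e2 : i2 = -1
    · subst e1; subst e2
      rw [pvA_base]
      simp
    · subst e1
      rw [pvA_mixed a1 a2 lo hi (by simp [e2])]
      simp [Ne.symm e2]
  · by_cases e2 : i2 = -1
    · subst e2
      rw [pvA_mixed a1 a2 lo hi (by simp [e1])]
      simp [e1]
    · have h := hpre ⟨e1, e2⟩
      rw [if_neg (by simp [e1, e2])]
      exact pv_main (pvMu a1.length i1 + pvMu a2.length i2) a1 a2 i1 i2 lo hi le_rfl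
        (Or.inr h.1) (Or.inr h.2)
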